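-- pv_equiv track=rewrite | github.com/alvinwang922/Data-Structures-and-Algorithms | Strings/Prime-or-Composite.py | primeOrComposite
-- ===== SOURCE A (Python) =====
-- def primeOrComposite(numbers):
--     numbers = numbers.split()
--     result = ""
--     for number in numbers:
--         number = int(number)
--         if number <= 1:
--             result += "Composite "
--         elif number <= 3:
--             result += "Prime "
--         else:
--             isPrime = True
--             i = 2
--             while((i * i) <= number):
--                 if number % i == 0:
--                     isPrime = False
--                 i += 1
--             if isPrime:
--                 result += "Prime "
--             else:
--                 result += "Composite "
--     return result
-- ===== SOURCE B (Python) =====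
-- def primeOrComposite(numbers):
--     nums = [int(token) for token in numbers.split()]
--     m = max(nums, default=0)
--     # integer square root of m (>= 1), without importing math
--     r = 1
--     while (r + 1) * (r + 1) <= m:
--         r += 1
--     # sieve the interval [2, r]: every composite there has a factor i with i*i <= j
--     marked = {j for i in range(2, r + 1) for j in range(i * i, r + 1, i)}
--     primes = [i for i in range(2, r + 1) if i not in marked]
--     labels = []
--     for n in nums:
--         if n <= 1 or any(p * p <= n and n % p == 0 for p in primes):
--             labels.append("Composite ")
--         else:
--             labels.append("Prime ")
--     return "".join(labels)
-- ===== Notes on version B (the rewrite author's own statement) =====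
-- stated objective: alternative
-- what changed: Instead of running a full trial-division loop for every token, B parses all tokens first, sieves the primes up to isqrt(max) once into a shared table, and labels each number by short-circuit divisibility against that prime table, joining the collected labels at the end.
import Mathlib
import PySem

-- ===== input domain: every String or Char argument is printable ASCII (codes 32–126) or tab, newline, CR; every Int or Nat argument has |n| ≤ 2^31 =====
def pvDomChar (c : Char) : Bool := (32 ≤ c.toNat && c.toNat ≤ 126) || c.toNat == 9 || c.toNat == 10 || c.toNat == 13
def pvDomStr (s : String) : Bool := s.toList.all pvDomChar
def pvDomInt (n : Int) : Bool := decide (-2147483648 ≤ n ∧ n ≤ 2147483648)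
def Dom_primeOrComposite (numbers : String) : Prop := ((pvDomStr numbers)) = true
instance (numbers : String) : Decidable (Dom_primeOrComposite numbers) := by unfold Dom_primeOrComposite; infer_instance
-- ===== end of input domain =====

-- B replaces A's per-number full trial-division loop by one shared sieve of the primes up to isqrt(max),
-- then labels each number by short-circuit divisibility against that prime table (objective: alternative).

-- ===== PORT A =====
-- while (i * i) <= number: if number % i == 0: isPrime = False; i += 1
def aWhile (n i : Int) (isPrime : Bool) : Bool :=
  if i * i ≤ n then
    aWhile n (i + 1) (if PySem.Int.mod n i == 0 then false else isPrime)
  else isPrime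
termination_by (n + 1 - i).toNat
decreasing_by
  have h0 : 0 ≤ i * i := mul_self_nonneg i
  have h2 : 2 * i - 1 ≤ i * i := by nlinarith [sq_nonneg (i - 1)]
  omega

def primeOrComposite (numbers : String) : String :=
  (PySem.Str.split₀ numbers).foldl (fun result number =>
    let n : Int := (PySem.Int.ofStr? number).getD 0
    if n ≤ 1 then result ++ "Composite "
    else if n ≤ 3 then result ++ "Prime "
    else if aWhile n 2 true then result ++ "Prime " else result ++ "Composite ") ""

-- ===== PORT B =====
-- r = 1; while (r+1)*(r+1) <= m: r += 1
def bSqrt (m r : Int) : Int :=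
  if (r + 1) * (r + 1) ≤ m then bSqrt m (r + 1) else r
termination_by (m - r).toNat
decreasing_by
  have h0 : 0 ≤ (r + 1) * (r + 1) := mul_self_nonneg (r + 1)
  have h2 : 2 * (r + 1) - 1 ≤ (r + 1) * (r + 1) := by nlinarith [sq_nonneg r]
  omega

def primeOrComposite_alt (numbers : String) : String :=
  let nums : List Int := (PySem.Str.split₀ numbers).map (fun token => (PySem.Int.ofStr? token).getD 0)
  let m : Int := PySem.List.maxD nums (fun x => x) 0
  let r : Int := bSqrt m 1
  let marked : PySem.Set Int := (PySem.List.pyRange 2 (r + 1) 1).foldl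
    (fun s i => (PySem.List.pyRange (i * i) (r + 1) i).foldl (fun s j => PySem.Set.add s j) s)
    PySem.Set.empty
  let primes : List Int := (PySem.List.pyRange 2 (r + 1) 1).filter
    (fun i => !(PySem.Set.contains marked i))
  let labels : List String := nums.foldl (fun acc n =>
    acc ++ [if n ≤ 1 || primes.any (fun p => decide (p * p ≤ n) && (PySem.Int.mod n p == 0))
            then "Composite " else "Prime "]) []
  PySem.Str.join "" labels

-- ===== PRECONDITION & SPEC =====
-- Pre_ excludes exactly the inputs on which Python A raises ValueError: a whitespace-separated
-- token that int() does not accept.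
def Pre_primeOrComposite (numbers : String) : Prop :=
  ∀ t ∈ PySem.Str.split₀ numbers, (PySem.Int.ofStr? t).isSome = true
instance (numbers : String) : Decidable (Pre_primeOrComposite numbers) := by
  unfold Pre_primeOrComposite; infer_instance

def pvWitness_primeOrComposite : String := "7 10 -3 97"

def Spec_primeOrComposite (numbers : String) (out : String) : Prop := out = primeOrComposite_alt numbers
instance (numbers : String) (out : String) : Decidable (Spec_primeOrComposite numbers out) := by unfold Spec_primeOrComposite; infer_instance

-- ===== CLAIM (what is proved, stated in full; the proofs are below) =====
def Claim_equal_primeOrComposite : Prop := ∀ (numbers : String), Dom_primeOrComposite numbers → Pre_primeOrComposite numbers → Spec_primeOrComposite numbers (primeOrComposite numbers)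

-- ===== LEMMAS AND PROOFS =====

-- proof-side names for the two label computations
def labelA (n : Int) : String :=
  if n ≤ 1 then "Composite "
  else if n ≤ 3 then "Prime "
  else if aWhile n 2 true then "Prime " else "Composite "

def markedOf (r : Int) : PySem.Set Int :=
  (PySem.List.pyRange 2 (r + 1) 1).foldl
    (fun s i => (PySem.List.pyRange (i * i) (r + 1) i).foldl (fun s j => PySem.Set.add s j) s)
    PySem.Set.empty

def primesOf (r : Int) : List Int :=
  (PySem.List.pyRange 2 (r + 1) 1).filter (fun i => !(PySem.Set.contains (markedOf r) i))

def labelB (r n : Int) : String :=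
  if n ≤ 1 || (primesOf r).any (fun p => decide (p * p ≤ n) && (PySem.Int.mod n p == 0))
  then "Composite " else "Prime "

-- characterisation of A's inner while loop
theorem aWhile_eq_true_iff (n i : Int) (b : Bool) (hi : 2 ≤ i) :
    aWhile n i b = true ↔ (b = true ∧ ∀ j : Int, i ≤ j → j * j ≤ n → ¬ (j ∣ n)) := by
  by_cases h : i * i ≤ n
  · rw [aWhile, if_pos h]
    have ih := aWhile_eq_true_iff n (i + 1)
      (if PySem.Int.mod n i == 0 then false else b) (by omega)
    rw [ih]
    by_cases hd : i ∣ n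
    · have hm : (PySem.Int.mod n i == 0) = true := by
        rw [beq_iff_eq, PySem.Int.mod_eq_zero_iff_dvd]; exact hd
      rw [hm]
      simp only [if_true]
      constructor
      · rintro ⟨h1, -⟩; cases h1
      · rintro ⟨-, hall⟩; exact absurd hd (hall i le_rfl h)
    · have hm : (PySem.Int.mod n i == 0) = false := by
        rw [beq_eq_false_iff_ne]
        intro hc; exact hd ((PySem.Int.mod_eq_zero_iff_dvd n i).mp hc)
      simp only [hm, Bool.false_eq_true, if_false]
      constructor
      · rintro ⟨hb, hall⟩
        refine ⟨hb, fun j hj hjj hdvd => ?_⟩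
        by_cases hji : i + 1 ≤ j
        · exact hall j hji hjj hdvd
        · have : j = i := by omega
          subst this; exact hd hdvd
      · rintro ⟨hb, hall⟩
        exact ⟨hb, fun j hj hjj hdvd => hall j (by omega) hjj hdvd⟩
  · rw [aWhile, if_neg h]
    constructor
    · intro hb
      refine ⟨hb, fun j hj hjj hdvd => ?_⟩
      have hii : i * i ≤ j * j := by nlinarith
      exact h (le_trans hii hjj)
    · rintro ⟨hb, -⟩; exact hb
termination_by (n + 1 - i).toNat
decreasing_by
  have h0 : 0 ≤ i * i := mul_self_nonneg i
  have h2 : 2 * i - 1 ≤ i * i := by nlinarith [sq_nonneg (i - 1)]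
  omega

theorem bSqrt_ge (m r : Int) : r ≤ bSqrt m r := by
  by_cases h : (r + 1) * (r + 1) ≤ m
  · rw [bSqrt, if_pos h]
    have := bSqrt_ge m (r + 1)
    omega
  · rw [bSqrt, if_neg h]
termination_by (m - r).toNat
decreasing_by
  have h0 : 0 ≤ (r + 1) * (r + 1) := mul_self_nonneg (r + 1)
  have h2 : 2 * (r + 1) - 1 ≤ (r + 1) * (r + 1) := by nlinarith [sq_nonneg r]
  omega

theorem bSqrt_lt (m r : Int) : m < (bSqrt m r + 1) * (bSqrt m r + 1) := by
  by_cases h : (r + 1) * (r + 1) ≤ m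
  · rw [bSqrt, if_pos h]
    exact bSqrt_lt m (r + 1)
  · rw [bSqrt, if_neg h]
    omega
termination_by (m - r).toNat
decreasing_by
  have h0 : 0 ≤ (r + 1) * (r + 1) := mul_self_nonneg (r + 1)
  have h2 : 2 * (r + 1) - 1 ≤ (r + 1) * (r + 1) := by nlinarith [sq_nonneg r]
  omega

-- membership in the folded-up set of composites
theorem mem_foldl_add (l : List Int) (s : PySem.Set Int) (x : Int) :
    x ∈ l.foldl (fun s j => PySem.Set.add s j) s ↔ x ∈ s ∨ x ∈ l := by
  induction l generalizing s with
  | nil => simp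
  | cons a t ih =>
    simp only [List.foldl_cons, ih, PySem.Set.mem_add, List.mem_cons]
    tauto

theorem mem_foldl_inner (l : List Int) (g : Int → List Int) (s : PySem.Set Int) (x : Int) :
    x ∈ l.foldl (fun s i => (g i).foldl (fun s j => PySem.Set.add s j) s) s
      ↔ x ∈ s ∨ ∃ i ∈ l, x ∈ g i := by
  induction l generalizing s with
  | nil => simp
  | cons a t ih =>
    simp only [List.foldl_cons, ih, mem_foldl_add, List.mem_cons]
    constructor
    · rintro (( hs | hg ) | ⟨i, hi, hx⟩)
      · exact Or.inl hs
      · exact Or.inr ⟨a, Or.inl rfl, hg⟩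
      · exact Or.inr ⟨i, Or.inr hi, hx⟩
    · rintro (hs | ⟨i, (rfl | hi), hx⟩)
      · exact Or.inl (Or.inl hs)
      · exact Or.inl (Or.inr hx)
      · exact Or.inr ⟨i, hi, hx⟩

theorem mem_markedOf (r x : Int) :
    x ∈ markedOf r ↔ ∃ i : Int, 2 ≤ i ∧ i * i ≤ x ∧ x < r + 1 ∧ i ∣ x := by
  unfold markedOf
  rw [mem_foldl_inner]
  simp only [PySem.Set.empty, List.not_mem_nil, false_or]
  constructor
  · rintro ⟨i, hi, hx⟩
    rw [PySem.List.mem_pyRange_one] at hi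
    rw [PySem.List.mem_pyRange_iff_of_pos (by omega)] at hx
    obtain ⟨h1, h2, h3⟩ := hx
    refine ⟨i, by omega, h1, h2, ?_⟩
    have hii : i ∣ i * i := dvd_mul_left i i
    have := dvd_add h3 hii
    simpa using this
  · rintro ⟨i, h2i, hiix, hxr, hdvd⟩
    have hipos : (0:Int) < i := by omega
    have hir : i < r + 1 := by nlinarith
    refine ⟨i, ?_, ?_⟩
    · rw [PySem.List.mem_pyRange_one]; omega
    · rw [PySem.List.mem_pyRange_iff_of_pos hipos]
      refine ⟨hiix, hxr, ?_⟩
      have hii : i ∣ i * i := dvd_mul_left i i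
      exact dvd_sub hdvd hii

-- 'no factor up to the square root' is primality (of the toNat)
theorem noFac_iff_prime (n : Int) (h2 : 2 ≤ n) :
    (∀ i : Int, 2 ≤ i → i * i ≤ n → ¬ (i ∣ n)) ↔ Nat.Prime n.toNat := by
  have hn0 : (n.toNat : Int) = n := Int.toNat_of_nonneg (by omega)
  constructor
  · intro hall
    by_contra hnp
    set N := n.toNat with hN
    have hNpos : 0 < N := by omega
    have hq := Nat.minFac_prime (n := N) (by omega)
    have hsq : N.minFac ^ 2 ≤ N := Nat.minFac_sq_le_self hNpos hnp
    have hdvd : N.minFac ∣ N := Nat.minFac_dvd N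
    refine hall (N.minFac : Int) ?_ ?_ ?_
    · exact_mod_cast hq.two_le
    · have : ((N.minFac : Int)) * (N.minFac : Int) = ((N.minFac ^ 2 : Nat) : Int) := by
        push_cast; ring
      rw [this, ← hn0]; exact_mod_cast hsq
    · rw [← hn0]; exact_mod_cast hdvd
  · intro hp i h2i hiin hdvd
    have hiN : i.toNat ∣ n.toNat := by
      have : (i.toNat : Int) ∣ (n.toNat : Int) := by
        rw [hn0, Int.toNat_of_nonneg (by omega : (0:Int) ≤ i)]; exact hdvd
      exact_mod_cast this
    rcases (Nat.Prime.eq_one_or_self_of_dvd hp _ hiN) with h1 | hs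
    · omega
    · have : i = n := by omega
      subst this
      nlinarith

theorem mem_primesOf (r p : Int) :
    p ∈ primesOf r ↔ (2 ≤ p ∧ p ≤ r ∧ Nat.Prime p.toNat) := by
  unfold primesOf
  rw [List.mem_filter]
  constructor
  · rintro ⟨hmem, hnc⟩
    rw [Bool.not_eq_eq_eq_not, Bool.not_true] at hnc
    rw [PySem.List.mem_pyRange_one] at hmem
    have h2p : 2 ≤ p := hmem.1
    have hpr : p ≤ r := by omega
    refine ⟨h2p, hpr, (noFac_iff_prime p h2p).mp ?_⟩
    intro i h2i hiip hdvd
    have : p ∈ markedOf r := by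
      rw [mem_markedOf]; exact ⟨i, h2i, hiip, by omega, hdvd⟩
    rw [← PySem.Set.contains_iff] at this
    rw [this] at hnc
    simp at hnc
  · rintro ⟨h2p, hpr, hp⟩
    constructor
    · rw [PySem.List.mem_pyRange_one]; omega
    · simp only [Bool.not_eq_true']
      rw [Bool.eq_false_iff]
      intro hc
      rw [PySem.Set.contains_iff, mem_markedOf] at hc
      obtain ⟨i, h2i, hiip, -, hdvd⟩ := hc
      exact (noFac_iff_prime p h2p).mpr hp i h2i hiip hdvd

-- the per-number labels agree whenever n is below the sieve's reach
theorem label_eq (r n : Int) (hr : 1 ≤ r) (hrn : n < (r + 1) * (r + 1)) :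
    labelA n = labelB r n := by
  unfold labelA labelB
  by_cases h1 : n ≤ 1
  · simp [h1]
  · have h2n : 2 ≤ n := by omega
    have hanyiff : ((primesOf r).any
        (fun p => decide (p * p ≤ n) && (PySem.Int.mod n p == 0)) = true)
        ↔ ¬ Nat.Prime n.toNat := by
      rw [List.any_eq_true]
      constructor
      · rintro ⟨p, hp, hcond⟩
        rw [Bool.and_eq_true, decide_eq_true_eq, beq_iff_eq,
          PySem.Int.mod_eq_zero_iff_dvd] at hcond
        rw [mem_primesOf] at hp
        intro hprime
        exact (noFac_iff_prime n h2n).mpr hprime p hp.1 hcond.1 hcond.2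
      · intro hnp
        rw [← noFac_iff_prime n h2n] at hnp
        push Not at hnp
        obtain ⟨i, h2i, hiin, hdvd⟩ := hnp
        -- pass to the least prime factor
        have hNpos : 0 < n.toNat := by omega
        have hnprime : ¬ Nat.Prime n.toNat := by
          intro hprime
          exact (noFac_iff_prime n h2n).mpr hprime i h2i hiin hdvd
        have hq := Nat.minFac_prime (n := n.toNat) (by omega)
        have hsq : n.toNat.minFac ^ 2 ≤ n.toNat := Nat.minFac_sq_le_self hNpos hnprime
        have hdvdq : n.toNat.minFac ∣ n.toNat := Nat.minFac_dvd n.toNat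
        set q : Int := (n.toNat.minFac : Int) with hqdef
        have hn0 : (n.toNat : Int) = n := Int.toNat_of_nonneg (by omega)
        have h2q : 2 ≤ q := by rw [hqdef]; exact_mod_cast hq.two_le
        have hqq : q * q ≤ n := by
          have : (q * q) = ((n.toNat.minFac ^ 2 : Nat) : Int) := by push_cast; ring
          rw [this, ← hn0]; exact_mod_cast hsq
        have hqd : q ∣ n := by rw [hqdef, ← hn0]; exact_mod_cast hdvdq
        refine ⟨q, ?_, ?_⟩
        · rw [mem_primesOf]
          have hqr : q ≤ r := by nlinarith
          have : q.toNat = n.toNat.minFac := by omega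
          rw [this]
          exact ⟨h2q, hqr, hq⟩
        · rw [Bool.and_eq_true, decide_eq_true_eq, beq_iff_eq,
            PySem.Int.mod_eq_zero_iff_dvd]
          exact ⟨hqq, hqd⟩
    by_cases h3 : n ≤ 3
    · have hprime : Nat.Prime n.toNat := by
        interval_cases n <;> decide
      simp only [if_neg h1, if_pos h3]
      have : ((primesOf r).any
          (fun p => decide (p * p ≤ n) && (PySem.Int.mod n p == 0))) = false := by
        rw [Bool.eq_false_iff]; intro hc; exact (hanyiff.mp hc) hprime
      simp [h1, this]
    · have haiff := aWhile_eq_true_iff n 2 true (by omega)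
      simp only [true_and] at haiff
      rw [noFac_iff_prime n h2n] at haiff
      simp only [if_neg h1, if_neg h3]
      by_cases hp : Nat.Prime n.toNat
      · have ha : aWhile n 2 true = true := haiff.mpr hp
        have hb : ((primesOf r).any
            (fun p => decide (p * p ≤ n) && (PySem.Int.mod n p == 0))) = false := by
          rw [Bool.eq_false_iff]; intro hc; exact (hanyiff.mp hc) hp
        simp [ha, hb, h1]
      · have ha : aWhile n 2 true = false := by
          rw [Bool.eq_false_iff]; intro hc; exact hp (haiff.mp hc)
        have hb := hanyiff.mpr hp
        simp [ha, hb]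

theorem intercalate_nil_cons (a : List Char) (ls : List (List Char)) :
    List.intercalate [] (a :: ls) = a ++ List.intercalate [] ls := by
  cases ls <;> simp [List.intercalate, List.intersperse]

theorem join_empty_cons (x : String) (xs : List String) :
    PySem.Str.join "" (x :: xs) = x ++ PySem.Str.join "" xs := by
  apply String.toList_inj.mp
  rw [String.toList_append, PySem.Str.toList_join, PySem.Str.toList_join]
  simp only [PySem.Chars.join, List.map_cons]
  have h0 : ("" : String).toList = [] := rfl
  rw [h0, intercalate_nil_cons]

theorem join_empty_nil : PySem.Str.join "" ([] : List String) = "" := rfl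

theorem flatMap_singleton_map (l : List Int) (f : Int → String) :
    List.flatMap (fun n => [f n]) l = List.map f l := by
  induction l with
  | nil => rfl
  | cons a t ih => simp [List.flatMap_cons, ih]

-- A's whole fold builds the joined label list
theorem foldlA_eq (toks : List String) (s : String) :
    toks.foldl (fun result number =>
      let n : Int := (PySem.Int.ofStr? number).getD 0
      if n ≤ 1 then result ++ "Composite "
      else if n ≤ 3 then result ++ "Prime "
      else if aWhile n 2 true then result ++ "Prime " else result ++ "Composite ") s
    = s ++ PySem.Str.join ""
        (toks.map (fun t => labelA ((PySem.Int.ofStr? t).getD 0))) := by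
  induction toks generalizing s with
  | nil => simp [join_empty_nil]
  | cons t ts ih =>
    rw [List.foldl_cons, ih, List.map_cons, join_empty_cons, ← String.append_assoc]
    congr 1
    unfold labelA
    dsimp only
    split_ifs <;> rfl

-- B's label list is a map
theorem altList_eq (nums : List Int) (r : Int) :
    nums.foldl (fun acc n =>
      acc ++ [if n ≤ 1 || (primesOf r).any
                (fun p => decide (p * p ≤ n) && (PySem.Int.mod n p == 0))
              then "Composite " else "Prime "]) []
    = nums.map (labelB r) := by
  rw [PySem.List.foldl_append_eq_flatMap]
  rw [List.nil_append]
  unfold labelB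
  exact flatMap_singleton_map nums _

-- ===== VERDICT (by name: the statement is the Claim_ definition above) =====
theorem primeOrComposite_spec : Claim_equal_primeOrComposite := by
  intro numbers _ _
  unfold Spec_primeOrComposite
  unfold primeOrComposite primeOrComposite_alt
  dsimp only
  rw [foldlA_eq]
  set toks := PySem.Str.split₀ numbers with htoks
  set nums : List Int := toks.map (fun t => (PySem.Int.ofStr? t).getD 0) with hnums
  set m : Int := PySem.List.maxD nums (fun x => x) 0 with hm
  set r : Int := bSqrt m 1 with hr
  have hmrk : ((PySem.List.pyRange 2 (r + 1) 1).foldl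
      (fun s i => (PySem.List.pyRange (i * i) (r + 1) i).foldl
        (fun s j => PySem.Set.add s j) s) PySem.Set.empty) = markedOf r := rfl
  rw [hmrk]
  have hpr : ((PySem.List.pyRange 2 (r + 1) 1).filter
      (fun i => !(PySem.Set.contains (markedOf r) i))) = primesOf r := rfl
  rw [hpr, altList_eq]
  have hempty : ∀ s : String, ("" : String) ++ s = s := fun s => by
    apply String.toList_inj.mp
    rw [String.toList_append]; rfl
  rw [hempty]
  congr 1
  rw [hnums, List.map_map]
  apply List.map_congr_left
  intro t ht
  set n : Int := (PySem.Int.ofStr? t).getD 0 with hn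
  have hnmem : n ∈ nums := by
    rw [hnums]; exact List.mem_map_of_mem ht
  have hne : nums ≠ [] := by
    intro hc; rw [hc] at hnmem; cases hnmem
  obtain ⟨mv, hmv⟩ : ∃ mv, PySem.List.max? nums (fun x => x) = some mv := by
    cases hx : PySem.List.max? nums (fun x => x) with
    | none => exact absurd ((PySem.List.max?_eq_none_iff _ _).mp hx) hne
    | some v => exact ⟨v, rfl⟩
  have hmval : m = mv := by rw [hm, PySem.List.maxD, hmv]; rfl
  have hnm : n ≤ m := by
    rw [hmval]; exact PySem.List.max?_isMax hmv n hnmem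
  have h1r : 1 ≤ r := bSqrt_ge m 1
  have hlt : n < (r + 1) * (r + 1) := lt_of_le_of_lt hnm (bSqrt_lt m 1)
  exact label_eq r n h1r hlt
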